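-- pv_equiv track=rewrite | github.com/sararin/gChallenges | 004_MarkovChainSentenceGenerator/main.py | genPairs
-- ===== SOURCE A (Python) =====
-- def genPairs(sentence):
--   generatedPairs = {x:[] for x in sentence}
--   generatedPairs['.'] = []
--   generatedPairs[','] = []
--   for key, value in generatedPairs.items():
--     for x, y in enumerate(sentence):
--       if key in '.,?!':
--         pass
--       elif key == y:
--         if not (x+1) >= len(sentence):
--           generatedPairs[key].append(sentence[x+1])
--   return generatedPairs
--   """
--   generatedPairs = []
--   generatedPairs.append((sentence.pop(-2),sentence.pop()))
--   while sentence: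
--     x = sentence.pop()
--     if '.' in x:
--       generatedPairs.append((x[:-1], '.'))
--     else:
--       generatedPairs.append((x, generatedPairs[-1][0]))
--   generatedPairs.reverse()
--   return generatedPairs
--   """
-- ===== SOURCE B (Python) =====
-- def genPairs(sentence):
--   pairs = {x: [] for x in sentence}
--   pairs['.'] = []
--   pairs[','] = []
--   for cur, nxt in zip(sentence, sentence[1:]):
--     if cur not in '.,?!':
--       pairs[cur].append(nxt)
--   return pairs
-- ===== Notes on version B (the rewrite author's own statement) =====
-- stated objective: faster
-- what changed: Instead of scanning the whole sentence once per dictionary key (comparing every word against every key), B makes a single pass over adjacent word pairs and appends each successor directly to its word's list.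
import Mathlib
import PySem

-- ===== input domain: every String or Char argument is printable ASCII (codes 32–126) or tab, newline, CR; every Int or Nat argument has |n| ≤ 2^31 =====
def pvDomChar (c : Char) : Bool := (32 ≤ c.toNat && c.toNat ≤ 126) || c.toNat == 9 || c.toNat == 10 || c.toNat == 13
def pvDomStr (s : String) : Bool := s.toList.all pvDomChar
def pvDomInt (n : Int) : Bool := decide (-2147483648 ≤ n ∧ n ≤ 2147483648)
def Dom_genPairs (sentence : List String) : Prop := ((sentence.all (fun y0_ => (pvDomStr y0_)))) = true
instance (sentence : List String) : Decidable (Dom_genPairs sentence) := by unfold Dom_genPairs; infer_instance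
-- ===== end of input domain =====

-- B replaces A's per-key rescans of the sentence with one pass over adjacent word pairs (faster, asymptotic).


-- ===== PORT A =====
-- the initial dict {x:[] for x in sentence} with '.' and ',' keys added
def genPairsInit (sentence : List String) : PySem.Dict String (List String) :=
  ((sentence.foldl (fun d x => d.insert x []) PySem.Dict.empty).insert "." []).insert "," []

-- the body of A's outer loop: one full scan of enumerate(sentence) for one key
-- (sentence[x+1] is guarded by the range test, so pyGetD with a dummy default is exact)
def genPairsScan (sentence : List String) (key : String)
    (d : PySem.Dict String (List String)) : PySem.Dict String (List String) :=
  (PySem.List.enumerate sentence 0).foldl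
    (fun d p =>
      if PySem.Str.isIn key ".,?!" then d
      else if key == p.2 then
        if ¬ ((sentence.length : Int) ≤ p.1 + 1) then
          d.modify key [] (· ++ [PySem.List.pyGetD sentence (p.1 + 1) ""])
        else d
      else d)
    d

def genPairs (sentence : List String) : List (String × List String) :=
  let d0 := genPairsInit sentence
  (d0.items.foldl (fun d kv => genPairsScan sentence kv.1 d) d0).items

-- ===== PORT B =====
def genPairs_alt (sentence : List String) : List (String × List String) :=
  let d0 := genPairsInit sentence
  ((sentence.zip (PySem.List.slice sentence (some 1) none)).foldl
    (fun d q =>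
      if ¬ PySem.Str.isIn q.1 ".,?!" then d.modify q.1 [] (· ++ [q.2]) else d)
    d0).items

-- ===== PRECONDITION & SPEC =====
def Spec_genPairs (sentence : List String) (out : List (String × List String)) : Prop := out = genPairs_alt sentence
instance (sentence : List String) (out : List (String × List String)) : Decidable (Spec_genPairs sentence out) := by unfold Spec_genPairs; infer_instance

-- ===== CLAIM (what is proved, stated in full; the proofs are below) =====
def Claim_equal_genPairs : Prop := ∀ (sentence : List String), Dom_genPairs sentence → Spec_genPairs sentence (genPairs sentence)

-- ===== LEMMAS AND PROOFS =====

def succsOf (sentence : List String) (c : String) : List String :=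
  ((sentence.zip sentence.tail).filter (fun q => q.1 == c)).map (·.2)

theorem enum_succ (X : String → Bool) :
    ∀ (t : List String) (s : Nat) (l : List String), l.drop s = t →
    ((PySem.List.enumerate t (s : Int)).filter
        (fun p => X p.2 && !decide ((l.length : Int) ≤ p.1 + 1))).map
      (fun p => PySem.List.pyGetD l (p.1 + 1) "")
    = ((t.zip t.tail).filter (fun q => X q.1)).map (·.2) := by
  intro t
  induction t with
  | nil => intro s l _; simp [PySem.List.enumerate_nil]
  | cons x t' ih =>
    intro s l hdrop
    have hs : s < l.length := by
      by_contra h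
      rw [List.drop_eq_nil_of_le (by omega)] at hdrop
      simp at hdrop
    have hlen : l.length = s + 1 + t'.length := by
      have := congrArg List.length hdrop
      simp [List.length_drop] at this
      omega
    rw [PySem.List.enumerate_cons]
    cases t' with
    | nil =>
      simp only [List.length_nil] at hlen
      rw [List.filter_cons]
      have : ((l.length : Int) ≤ (s:Int) + 1) := by omega
      simp [this, PySem.List.enumerate_nil]
    | cons y t'' =>
      have hdrop' : l.drop (s + 1) = y :: t'' := by
        have := congrArg List.tail hdrop
        rwa [List.tail_drop] at this
      have hy : l[s + 1]? = some y := by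
        have := congrArg (fun u => u[0]?) hdrop'
        simpa [List.getElem?_drop] using this
      have hget : PySem.List.pyGetD l ((s : Int) + 1) "" = y := by
        have h1 : ((s : Int) + 1) = ((s + 1 : Nat) : Int) := by push_cast; ring
        rw [h1, PySem.List.pyGetD_natCast]
        simp [hy]
      simp only [List.length_cons] at hlen
      have hcond : ¬ ((l.length : Int) ≤ (s : Int) + 1) := by omega
      have ihres := ih (s + 1) l hdrop'
      have hcast : ((s + 1 : Nat) : Int) = (s : Int) + 1 := by push_cast; ring
      rw [hcast] at ihres
      rw [List.filter_cons]
      cases hX : X x with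
      | false => simpa [hX, hcond] using ihres
      | true => simpa [hX, hcond, hget] using ihres


theorem init_nodup (sentence : List String) : (genPairsInit sentence).keys.Nodup := by
  unfold genPairsInit
  exact PySem.Dict.nodup_keys_insert _ _ _
    (PySem.Dict.nodup_keys_insert _ _ _
      (PySem.Dict.nodup_keys_foldl_insert _ _ _ PySem.Dict.nodup_keys_empty))

theorem foldl_keys_pres {α : Type} (l : List α)
    (f : PySem.Dict String (List String) → α → PySem.Dict String (List String))
    (d : PySem.Dict String (List String))
    (h : ∀ d' a, a ∈ l → d'.keys = d.keys → (f d' a).keys = d'.keys) :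
    (l.foldl f d).keys = d.keys := by
  suffices H : ∀ (l' : List α), (∀ d' a, a ∈ l' → d'.keys = d.keys → (f d' a).keys = d'.keys) →
      ∀ d', d'.keys = d.keys → (l'.foldl f d').keys = d.keys from H l h d rfl
  intro l'
  induction l' with
  | nil => intro _ d' hd; simpa using hd
  | cons a t ih =>
    intro h' d' hd
    simp only [List.foldl_cons]
    exact ih (fun d'' b hb => h' d'' b (List.mem_cons_of_mem _ hb)) _
      ((h' d' a (List.mem_cons_self) hd).trans hd)

theorem foldl_getD_pres {α : Type} (l : List α)
    (f : PySem.Dict String (List String) → α → PySem.Dict String (List String))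
    (d : PySem.Dict String (List String)) (c : String)
    (h : ∀ d' a, (f d' a).getD c [] = d'.getD c []) :
    (l.foldl f d).getD c [] = d.getD c [] := by
  induction l generalizing d with
  | nil => rfl
  | cons a t ih =>
    simp only [List.foldl_cons]
    rw [ih, h]

theorem scan_keys (sentence : List String) (k : String)
    (d : PySem.Dict String (List String)) (hc : d.contains k = true) :
    (genPairsScan sentence k d).keys = d.keys := by
  unfold genPairsScan
  apply foldl_keys_pres
  intro d' p _ hd
  have hc' : d'.contains k = true := by
    rw [PySem.Dict.contains_iff_mem_keys, hd, ← PySem.Dict.contains_iff_mem_keys]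
    exact hc
  split_ifs
  all_goals first
    | rfl
    | rw [PySem.Dict.keys_modify, PySem.Dict.keys_insert_of_contains _ _ hc']

theorem scan_getD_ne (sentence : List String) (k c : String) (h : k ≠ c)
    (d : PySem.Dict String (List String)) :
    (genPairsScan sentence k d).getD c [] = d.getD c [] := by
  unfold genPairsScan
  apply foldl_getD_pres
  intro d' p
  split_ifs
  all_goals first
    | rfl
    | rw [PySem.Dict.getD_modify_of_ne _ _ _ (Ne.symm h)]

theorem scan_getD_self_punct (sentence : List String) (c : String)
    (hp : PySem.Str.isIn c ".,?!" = true) (d : PySem.Dict String (List String)) :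
    genPairsScan sentence c d = d := by
  unfold genPairsScan
  simp only [hp, if_true]
  exact PySem.List.foldl_ignore _ _

theorem scan_getD_self (sentence : List String) (c : String)
    (hp : PySem.Str.isIn c ".,?!" = false) (d : PySem.Dict String (List String)) :
    (genPairsScan sentence c d).getD c [] = d.getD c [] ++ succsOf sentence c := by
  unfold genPairsScan
  have hbody : (fun (d : PySem.Dict String (List String)) (p : Int × String) =>
      if PySem.Str.isIn c ".,?!" = true then d
      else if (c == p.2) = true then
        if ¬ ((sentence.length : Int) ≤ p.1 + 1) then
          d.modify c [] (· ++ [PySem.List.pyGetD sentence (p.1 + 1) ""])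
        else d
      else d)
      = (fun d p =>
        if (c == p.2 && !decide ((sentence.length : Int) ≤ p.1 + 1)) = true then
          d.modify c [] (· ++ [PySem.List.pyGetD sentence (p.1 + 1) ""]) else d) := by
    funext d p
    simp only [hp, Bool.false_eq_true, if_false, Bool.and_eq_true, Bool.not_eq_true',
      decide_eq_false_iff_not]
    split_ifs with h1 h2 h3 h4 <;> simp_all
  rw [hbody]
  rw [show List.foldl
        (fun (d : PySem.Dict String (List String)) (p : Int × String) =>
          if (c == p.2 && !decide ((sentence.length : Int) ≤ p.1 + 1)) = true then
            d.modify c [] (· ++ [PySem.List.pyGetD sentence (p.1 + 1) ""]) else d)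
        d (PySem.List.enumerate sentence)
      = List.foldl
          (fun (d : PySem.Dict String (List String)) (p : Int × String) =>
            d.modify c [] (· ++ [PySem.List.pyGetD sentence (p.1 + 1) ""]))
          d ((PySem.List.enumerate sentence).filter
              (fun p => c == p.2 && !decide ((sentence.length : Int) ≤ p.1 + 1)))
      from PySem.List.foldl_if_eq_foldl_filter _ _ _ _]
  rw [show List.foldl
        (fun (d : PySem.Dict String (List String)) (p : Int × String) =>
          d.modify c [] (· ++ [PySem.List.pyGetD sentence (p.1 + 1) ""]))
        d ((PySem.List.enumerate sentence).filter
            (fun p => c == p.2 && !decide ((sentence.length : Int) ≤ p.1 + 1)))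
      = List.foldl
          (fun (d : PySem.Dict String (List String)) (q : String × String) =>
            d.modify q.1 [] (· ++ [q.2]))
          d (((PySem.List.enumerate sentence).filter
              (fun p => c == p.2 && !decide ((sentence.length : Int) ≤ p.1 + 1))).map
             (fun p => (c, PySem.List.pyGetD sentence (p.1 + 1) "")))
      from (List.foldl_map
          (f := fun p : Int × String => (c, PySem.List.pyGetD sentence (p.1 + 1) ""))
          (g := fun (d : PySem.Dict String (List String)) (q : String × String) =>
            d.modify q.1 [] (· ++ [q.2]))).symm]
  rw [PySem.Dict.getD_foldl_modify_append]
  congr 1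
  rw [List.filter_map]
  rw [List.filter_eq_self.mpr (by intro a _; simp), List.map_map]
  have h := enum_succ (fun y => c == y) sentence 0 sentence (by simp)
  simp only [Nat.cast_zero] at h
  unfold succsOf
  have hswap : List.filter (fun q : String × String => q.1 == c) (sentence.zip sentence.tail)
      = List.filter (fun q => c == q.1) (sentence.zip sentence.tail) :=
    List.filter_congr (fun q _ => by rw [Bool.beq_comm])
  rw [hswap, ← h]
  simp [Function.comp_def]

theorem alt_fold_getD (sentence : List String) (c : String)
    (d : PySem.Dict String (List String)) :
    ((sentence.zip sentence.tail).foldl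
      (fun d q => if ¬ PySem.Str.isIn q.1 ".,?!" then d.modify q.1 [] (· ++ [q.2]) else d)
      d).getD c []
    = d.getD c [] ++ (if PySem.Str.isIn c ".,?!" = true then [] else succsOf sentence c) := by
  rw [show List.foldl
        (fun (d : PySem.Dict String (List String)) (q : String × String) =>
          if ¬ PySem.Str.isIn q.1 ".,?!" = true then d.modify q.1 [] (· ++ [q.2]) else d)
        d (sentence.zip sentence.tail)
      = List.foldl (fun d q => d.modify q.1 [] (· ++ [q.2])) d
          ((sentence.zip sentence.tail).filter
            (fun q => decide (¬ PySem.Str.isIn q.1 ".,?!" = true)))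
      from PySem.List.foldl_ite_eq_foldl_filter _ _ _ _]
  rw [PySem.Dict.getD_foldl_modify_append]
  congr 1
  rw [List.filter_filter]
  unfold succsOf
  cases hp : PySem.Str.isIn c ".,?!" with
  | true =>
    rw [show (fun q : String × String =>
          q.1 == c && decide (¬ PySem.Str.isIn q.1 ".,?!" = true)) = fun _ => false by
      funext q
      cases hq : q.1 == c
      · simp
      · have : q.1 = c := eq_of_beq hq
        have hp' : PySem.Chars.isIn c.toList ['.', ',', '?', '!'] = true := by simpa using hp
        simp [this, hp']]
    simp
  | false =>
    rw [show (fun q : String × String =>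
          q.1 == c && decide (¬ PySem.Str.isIn q.1 ".,?!" = true)) = fun q => q.1 == c by
      funext q
      cases hq : q.1 == c
      · simp
      · have : q.1 = c := eq_of_beq hq
        have hp' : PySem.Chars.isIn c.toList ['.', ',', '?', '!'] = false := by simpa using hp
        simp [this, hp']]
    simp

theorem outer_getD_notmem (sentence : List String) (c : String) (K : List String)
    (d : PySem.Dict String (List String)) (h : c ∉ K) :
    (K.foldl (fun d k => genPairsScan sentence k d) d).getD c [] = d.getD c [] := by
  induction K generalizing d with
  | nil => rfl
  | cons k t ih =>
    simp only [List.foldl_cons]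
    have hne : k ≠ c := fun he => h (by simp [he])
    rw [ih _ (fun hm => h (List.mem_cons_of_mem _ hm)), scan_getD_ne _ _ _ hne]

theorem outer_getD (sentence : List String) (c : String) (K : List String)
    (d : PySem.Dict String (List String)) (hnd : K.Nodup) (hc : c ∈ K) :
    (K.foldl (fun d k => genPairsScan sentence k d) d).getD c []
    = d.getD c [] ++ (if PySem.Str.isIn c ".,?!" = true then [] else succsOf sentence c) := by
  induction K generalizing d with
  | nil => cases hc
  | cons k t ih =>
    simp only [List.foldl_cons]
    by_cases hk : k = c
    · rw [hk]
      have hnot : c ∉ t := hk ▸ (List.nodup_cons.mp hnd).1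
      rw [outer_getD_notmem _ _ _ _ hnot]
      cases hp : PySem.Str.isIn c ".,?!" with
      | true => rw [scan_getD_self_punct _ _ hp]; simp
      | false => rw [scan_getD_self _ _ hp]; simp
    · have hct : c ∈ t := by
        rcases List.mem_cons.mp hc with h | h
        · exact absurd h.symm hk
        · exact h
      rw [ih _ (List.nodup_cons.mp hnd).2 hct, scan_getD_ne _ _ _ hk]

theorem outer_keys (sentence : List String) (K : List String)
    (d : PySem.Dict String (List String)) (h : ∀ k ∈ K, k ∈ d.keys) :
    (K.foldl (fun d k => genPairsScan sentence k d) d).keys = d.keys := by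
  apply foldl_keys_pres
  intro d' k hk hd
  rw [scan_keys]
  rw [PySem.Dict.contains_iff_mem_keys, hd]
  exact h k hk

theorem init_mem_keys (sentence : List String) (x : String) (hx : x ∈ sentence) :
    x ∈ (genPairsInit sentence).keys := by
  unfold genPairsInit
  rw [PySem.Dict.mem_keys_insert, PySem.Dict.mem_keys_insert,
    PySem.Dict.keys_foldl_insert]
  right; right
  exact (PySem.Set.mem_update _ _ _).mpr (Or.inr hx)

-- ===== VERDICT (by name: the statement is the Claim_ definition above) =====
theorem genPairs_spec : Claim_equal_genPairs := by
  unfold Claim_equal_genPairs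
  intro sentence _
  unfold Spec_genPairs genPairs genPairs_alt
  simp only [PySem.List.slice_from_one]
  have nod := init_nodup sentence
  have hfold : (genPairsInit sentence).items.foldl
        (fun d kv => genPairsScan sentence kv.1 d) (genPairsInit sentence)
      = (genPairsInit sentence).keys.foldl
        (fun d k => genPairsScan sentence k d) (genPairsInit sentence) := by
    rw [show (genPairsInit sentence).keys = (genPairsInit sentence).items.map (·.1) from rfl]
    rw [List.foldl_map (f := fun kv : String × List String => kv.1)
      (g := fun d k => genPairsScan sentence k d)]
  rw [hfold]
  have hAkeys := outer_keys sentence (genPairsInit sentence).keys (genPairsInit sentence)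
    (fun k hk => hk)
  have hBkeys : ((sentence.zip sentence.tail).foldl
      (fun d q => if ¬ PySem.Str.isIn q.1 ".,?!" then d.modify q.1 [] (· ++ [q.2]) else d)
      (genPairsInit sentence)).keys = (genPairsInit sentence).keys := by
    apply foldl_keys_pres
    intro d' q hq hd
    split_ifs
    all_goals first
      | rfl
      | · rw [PySem.Dict.keys_modify, PySem.Dict.keys_insert_of_contains]
          rw [PySem.Dict.contains_iff_mem_keys, hd]
          obtain ⟨a, b⟩ := q
          exact init_mem_keys sentence a (List.of_mem_zip hq).1
  rw [PySem.Dict.items_eq_map_keys _ (by rw [hAkeys]; exact nod) [],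
    PySem.Dict.items_eq_map_keys _ (by rw [hBkeys]; exact nod) [], hAkeys, hBkeys]
  apply List.map_congr_left
  intro k hk
  rw [outer_getD sentence k _ _ nod hk, alt_fold_getD sentence k]
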